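-- pv_equiv track=rewrite | github.com/Ehsan-Tavan/Explainable_Detection_of_Online_Sexism | src/utils/helper.py | create_mask
-- ===== SOURCE A (Python) =====
-- from typing import List
--
-- def create_mask(num_samples: int, doc_id_chunks: List[list]):
--     mask_ids = []
--     for data in doc_id_chunks:
--         data_masks = []
--         for idx in range(num_samples):
--             if idx in data:
--                 data_masks.append(True)
--             else:
--                 data_masks.append(False)
--         mask_ids.append(data_masks)
--     return mask_ids
-- ===== SOURCE B (Python) =====
-- def _chunk_mask(num_samples, data):
--     mask = [False] * num_samples
--     for idx in data:
--         if 0 <= idx < num_samples: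
--             mask[idx] = True
--     return mask
--
--
-- def create_mask(num_samples, doc_id_chunks):
--     return [_chunk_mask(num_samples, data) for data in doc_id_chunks]
-- ===== Notes on version B (the rewrite author's own statement) =====
-- stated objective: faster
-- what changed: Replaced the per-index membership gather (scan the whole chunk for every index in range(num_samples)) by a scatter: preallocate an all-False mask per chunk and mark mask[idx]=True for each in-range chunk element.
import Mathlib
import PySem

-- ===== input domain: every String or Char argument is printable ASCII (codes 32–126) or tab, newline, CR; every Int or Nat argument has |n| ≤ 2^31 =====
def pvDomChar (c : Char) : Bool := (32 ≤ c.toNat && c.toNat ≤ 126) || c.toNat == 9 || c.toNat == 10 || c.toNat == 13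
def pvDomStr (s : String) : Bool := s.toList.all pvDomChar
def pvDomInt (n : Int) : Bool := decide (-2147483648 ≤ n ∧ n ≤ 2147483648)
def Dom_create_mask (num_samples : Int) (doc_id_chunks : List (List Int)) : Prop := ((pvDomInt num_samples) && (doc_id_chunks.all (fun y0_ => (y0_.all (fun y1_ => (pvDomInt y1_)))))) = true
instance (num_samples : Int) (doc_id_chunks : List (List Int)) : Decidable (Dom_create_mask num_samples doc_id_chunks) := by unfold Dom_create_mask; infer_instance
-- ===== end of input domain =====

-- B replaces A's per-index membership gather by a per-chunk scatter into a preallocated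
-- False mask (asymptotically fewer chunk scans); proved to return the same masks on all inputs.


-- ===== PORT A =====
def create_mask (num_samples : Int) (doc_id_chunks : List (List Int)) : List (List Bool) :=
  doc_id_chunks.foldl
    (fun mask_ids data =>
      mask_ids ++
        [(PySem.List.pyRange 0 num_samples 1).foldl
          (fun data_masks idx =>
            if data.contains idx then data_masks ++ [true] else data_masks ++ [false])
          []])
    []

-- ===== PORT B =====
def chunk_mask (num_samples : Int) (data : List Int) : List Bool :=
  data.foldl
    (fun mask idx =>
      if 0 ≤ idx ∧ idx < num_samples then mask.set idx.toNat true else mask)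
    (List.replicate num_samples.toNat false)

def create_mask_alt (num_samples : Int) (doc_id_chunks : List (List Int)) : List (List Bool) :=
  doc_id_chunks.map (chunk_mask num_samples)

-- ===== PRECONDITION & SPEC =====
def Spec_create_mask (num_samples : Int) (doc_id_chunks : List (List Int)) (out : List (List Bool)) : Prop := out = create_mask_alt num_samples doc_id_chunks
instance (num_samples : Int) (doc_id_chunks : List (List Int)) (out : List (List Bool)) : Decidable (Spec_create_mask num_samples doc_id_chunks out) := by unfold Spec_create_mask; infer_instance

-- ===== CLAIM (what is proved, stated in full; the proofs are below) =====
def Claim_equal_create_mask : Prop := ∀ (num_samples : Int) (doc_id_chunks : List (List Int)), Dom_create_mask num_samples doc_id_chunks → Spec_create_mask num_samples doc_id_chunks (create_mask num_samples doc_id_chunks)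

-- ===== LEMMAS AND PROOFS =====

-- accumulator-append folds are maps
theorem foldl_app_singleton {α β : Type} (f : α → β) :
    ∀ (l : List α) (init : List β),
      l.foldl (fun acc x => acc ++ [f x]) init = init ++ l.map f := by
  intro l
  induction l with
  | nil => intro init; simp
  | cons x xs ih => intro init; simp [List.foldl, ih]

theorem scatter_length (num_samples : Int) :
    ∀ (data : List Int) (mask : List Bool),
      (data.foldl
        (fun mask idx =>
          if 0 ≤ idx ∧ idx < num_samples then mask.set idx.toNat true else mask)
        mask).length = mask.length := by
  intro data
  induction data with
  | nil => intro mask; simp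
  | cons idx rest ih =>
      intro mask
      simp only [List.foldl]
      rw [ih]
      split <;> simp

theorem scatter_getElem (num_samples : Int) :
    ∀ (data : List Int) (mask : List Bool)
      (_hlen : mask.length = num_samples.toNat) (i : Nat) (hi : i < mask.length),
      (data.foldl
        (fun mask idx =>
          if 0 ≤ idx ∧ idx < num_samples then mask.set idx.toNat true else mask)
        mask)[i]'(by rw [scatter_length]; exact hi)
        = (mask[i] || decide ((i : Int) ∈ data)) := by
  intro data
  induction data with
  | nil => intro mask hlen i hi; simp
  | cons idx rest ih =>
      intro mask hlen i hi
      have hiN : (i : Int) < num_samples ∧ 0 ≤ (i : Int) := by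
        constructor
        · omega
        · exact Int.natCast_nonneg i
      simp only [List.foldl]
      by_cases h : 0 ≤ idx ∧ idx < num_samples
      · simp only [if_pos h]
        have hset : (mask.set idx.toNat true).length = mask.length := by simp
        rw [ih (mask.set idx.toNat true) (by rw [hset, hlen]) i (by rwa [hset])]
        by_cases hij : idx.toNat = i
        · have : (i : Int) = idx := by omega
          simp [hij, this, List.mem_cons]
        · have : (i : Int) ≠ idx := by omega
          simp [hij, this, List.mem_cons]
      · simp only [if_neg h]
        rw [ih mask hlen i hi]
        have : (i : Int) ≠ idx := by omega
        simp [this, List.mem_cons]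

theorem chunk_eq (num_samples : Int) (data : List Int) :
    (PySem.List.pyRange 0 num_samples 1).foldl
      (fun data_masks idx =>
        if data.contains idx then data_masks ++ [true] else data_masks ++ [false])
      [] = chunk_mask num_samples data := by
  have hfun : (fun (data_masks : List Bool) (idx : Int) =>
      if data.contains idx then data_masks ++ [true] else data_masks ++ [false])
      = fun data_masks idx => data_masks ++ [if data.contains idx then true else false] := by
    funext dm idx; split <;> simp_all
  rw [hfun, foldl_app_singleton (fun idx => if data.contains idx then true else false)]
  apply List.ext_getElem
  · simp [chunk_mask, scatter_length, PySem.List.length_pyRange_one]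
  · intro i h1 h2
    have hlenR : (List.replicate num_samples.toNat false).length = num_samples.toNat := by simp
    have hi' : i < (List.replicate num_samples.toNat false).length := by
      simpa [PySem.List.length_pyRange_one] using h1
    have key : (chunk_mask num_samples data)[i]'h2
        = ((List.replicate num_samples.toNat false)[i]'hi' || decide ((i : Int) ∈ data)) :=
      scatter_getElem num_samples data _ hlenR i hi'
    rw [key]
    simp [PySem.List.getElem_pyRange_one]

theorem outer_eq (num_samples : Int) :
    ∀ (chunks : List (List Int)) (init : List (List Bool)),
      chunks.foldl
        (fun mask_ids data =>
          mask_ids ++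
            [(PySem.List.pyRange 0 num_samples 1).foldl
              (fun data_masks idx =>
                if data.contains idx then data_masks ++ [true] else data_masks ++ [false])
              []])
        init = init ++ chunks.map (chunk_mask num_samples) := by
  intro chunks
  induction chunks with
  | nil => intro init; simp
  | cons data rest ih =>
      intro init
      simp only [List.foldl]
      rw [ih, chunk_eq]
      simp

-- ===== VERDICT (by name: the statement is the Claim_ definition above) =====
theorem create_mask_spec : Claim_equal_create_mask := by
  intro num_samples doc_id_chunks _
  show create_mask num_samples doc_id_chunks = create_mask_alt num_samples doc_id_chunks
  unfold create_mask create_mask_alt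
  simpa using outer_eq num_samples doc_id_chunks []
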